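-- pv_equiv track=rewrite | github.com/Guatemaltecho/tomorrow-is-Today | recursive/recursive_vs_loop.py | iterative_summate
-- ===== SOURCE A (Python) =====
-- def iterative_summate(accum, seq):
--     while True:
--         if len(seq) == 0:
--             break
--
--         nxt = seq[0]
--         accum = accum + nxt
--         seq = seq[1:]
--
--     return accum
-- ===== SOURCE B (Python) =====
-- def iterative_summate(accum, seq):
--     return accum + sum(seq)
-- ===== Notes on version B (the rewrite author's own statement) =====
-- stated objective: faster
-- what changed: Replaced the while-loop that repeatedly slices seq[1:] (O(n^2) copying) with a single built-in sum added to accum.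
import Mathlib
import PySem

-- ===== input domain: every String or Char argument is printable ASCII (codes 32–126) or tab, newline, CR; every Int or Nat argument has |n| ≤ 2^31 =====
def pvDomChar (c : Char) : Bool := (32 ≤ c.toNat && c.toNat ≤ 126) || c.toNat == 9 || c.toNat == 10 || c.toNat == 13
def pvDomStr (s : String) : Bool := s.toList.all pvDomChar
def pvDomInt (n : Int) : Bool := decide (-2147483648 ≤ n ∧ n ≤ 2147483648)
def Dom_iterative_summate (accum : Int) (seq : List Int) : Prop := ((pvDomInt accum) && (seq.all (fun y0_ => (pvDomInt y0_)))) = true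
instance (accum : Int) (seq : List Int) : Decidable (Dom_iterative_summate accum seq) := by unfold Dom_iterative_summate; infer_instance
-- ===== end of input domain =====

-- B replaces the slice-per-iteration loop with a single accum + sum(seq) (asymptotically faster).


-- ===== PORT A =====
-- A: while-loop over seq, consuming head and re-slicing the tail; ported as structural recursion.
def iterative_summate (accum : Int) (seq : List Int) : Int :=
  match seq with
  | [] => accum
  | nxt :: rest => iterative_summate (accum + nxt) rest

-- ===== PORT B =====
-- B: accum + sum(seq); Python's sum ported as List.sum.
def iterative_summate_alt (accum : Int) (seq : List Int) : Int :=
  accum + seq.sum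

-- ===== PRECONDITION & SPEC =====
def Spec_iterative_summate (accum : Int) (seq : List Int) (out : Int) : Prop := out = iterative_summate_alt accum seq
instance (accum : Int) (seq : List Int) (out : Int) : Decidable (Spec_iterative_summate accum seq out) := by unfold Spec_iterative_summate; infer_instance

-- ===== CLAIM (what is proved, stated in full; the proofs are below) =====
def Claim_equal_iterative_summate : Prop := ∀ (accum : Int) (seq : List Int), Dom_iterative_summate accum seq → Spec_iterative_summate accum seq (iterative_summate accum seq)

-- ===== LEMMAS AND PROOFS =====

-- ===== VERDICT (by name: the statement is the Claim_ definition above) =====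
theorem iterative_summate_eq (accum : Int) (seq : List Int) :
    iterative_summate accum seq = iterative_summate_alt accum seq := by
  induction seq generalizing accum with
  | nil => simp [iterative_summate, iterative_summate_alt]
  | cons x xs ih =>
      simp [iterative_summate, iterative_summate_alt, ih, List.sum_cons]
      ring

theorem iterative_summate_spec : Claim_equal_iterative_summate := by
  intro accum seq _
  exact iterative_summate_eq accum seq
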